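-- pv_equiv track=rewrite | github.com/ujcycu/elephantChess_MahJong | alg.py | matchTwo
-- ===== SOURCE A (Python) =====
-- def matchTwo(array): #0, 1-10; 16, 17-26
--     for i in array:
--         if i == 0: #將
--             for j in array:
--                 if j == 16:
--                     return True #"將帥"
--         elif i > 0 and i <= 10: #士象車馬包 1-10
--             if i%2 == 0:
--                 for j in array:
--                     if j == i-1:
--                         return True #"兩支一樣的(黑)"
--         elif i > 16 and i <= 26:
--             if i%2 == 0:
--                 for j in array:
--                     if j == i-1:
--                         return True #"兩支一樣的(紅)"
-- ===== SOURCE B (Python) =====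
-- def matchTwo(array):
--     s = set(array)
--     if 0 in s and 16 in s:
--         return True
--     for v in range(2, 11, 2):
--         if v in s and v - 1 in s:
--             return True
--     for v in range(18, 27, 2):
--         if v in s and v - 1 in s:
--             return True
-- ===== Notes on version B (the rewrite author's own statement) =====
-- stated objective: simpler
-- what changed: Instead of scanning the array and, per tile, rescanning the whole array for its partner, B builds a set of the tiles once and enumerates the fixed eleven candidate winning pairs (the generals pair and the even/odd-neighbour pairs on each side), testing set membership.
import Mathlib
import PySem

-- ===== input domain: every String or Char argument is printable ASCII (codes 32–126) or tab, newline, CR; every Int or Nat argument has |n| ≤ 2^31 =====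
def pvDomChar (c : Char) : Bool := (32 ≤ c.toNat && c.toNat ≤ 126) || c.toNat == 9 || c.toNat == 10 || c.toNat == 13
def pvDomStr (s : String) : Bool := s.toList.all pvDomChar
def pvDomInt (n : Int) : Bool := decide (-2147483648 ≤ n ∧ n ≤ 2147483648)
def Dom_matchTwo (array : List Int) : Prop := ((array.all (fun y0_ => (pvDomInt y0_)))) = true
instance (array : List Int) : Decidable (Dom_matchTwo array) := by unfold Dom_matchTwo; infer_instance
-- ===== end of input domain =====

-- B replaces A's per-tile rescan of the array by one set build plus a scan over the
-- eleven fixed candidate pairs; result is True or the implicit None, as in A.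

-- ===== PORT A =====
-- inner 'for j in array: if j == t: return True' loop
def matchTwoFind (js : List Int) (t : Int) : Option Bool :=
  match js with
  | [] => none
  | j :: rest => if j = t then some true else matchTwoFind rest t

-- outer 'for i in array' loop
def matchTwoOuter (is_ : List Int) (array : List Int) : Option Bool :=
  match is_ with
  | [] => none
  | i :: rest =>
    if i = 0 then
      match matchTwoFind array 16 with
      | some b => some b
      | none => matchTwoOuter rest array
    else if i > 0 ∧ i ≤ 10 then
      if PySem.Int.mod i 2 = 0 then
        match matchTwoFind array (i - 1) with
        | some b => some b
        | none => matchTwoOuter rest array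
      else matchTwoOuter rest array
    else if i > 16 ∧ i ≤ 26 then
      if PySem.Int.mod i 2 = 0 then
        match matchTwoFind array (i - 1) with
        | some b => some b
        | none => matchTwoOuter rest array
      else matchTwoOuter rest array
    else matchTwoOuter rest array

def matchTwo (array : List Int) : Option Bool := matchTwoOuter array array

-- ===== PORT B =====
-- 'for v in <range>: if v in s and v - 1 in s: return True'
def matchTwoPairs (vs : List Int) (s : PySem.Set Int) : Option Bool :=
  match vs with
  | [] => none
  | v :: rest =>
    if PySem.Set.contains s v && PySem.Set.contains s (v - 1) then some true
    else matchTwoPairs rest s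

def matchTwo_alt (array : List Int) : Option Bool :=
  let s := PySem.Set.ofList array
  if PySem.Set.contains s 0 && PySem.Set.contains s 16 then some true
  else
    match matchTwoPairs (PySem.List.pyRange 2 11 2) s with
    | some b => some b
    | none => matchTwoPairs (PySem.List.pyRange 18 27 2) s

-- ===== PRECONDITION & SPEC =====
def Spec_matchTwo (array : List Int) (out : Option Bool) : Prop := out = matchTwo_alt array
instance (array : List Int) (out : Option Bool) : Decidable (Spec_matchTwo array out) := by unfold Spec_matchTwo; infer_instance

-- ===== CLAIM (what is proved, stated in full; the proofs are below) =====
def Claim_equal_matchTwo : Prop := ∀ (array : List Int), Dom_matchTwo array → Spec_matchTwo array (matchTwo array)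

-- ===== LEMMAS AND PROOFS =====

theorem matchTwoFind_eq (js : List Int) (t : Int) :
    matchTwoFind js t = if t ∈ js then some true else none := by
  induction js with
  | nil => simp [matchTwoFind]
  | cons j rest ih =>
    by_cases h : j = t
    · simp [matchTwoFind, h]
    · rw [show matchTwoFind (j :: rest) t = if j = t then some true else matchTwoFind rest t
        from rfl, if_neg h, ih]
      by_cases ht : t ∈ rest
      · rw [if_pos ht, if_pos (List.mem_cons_of_mem _ ht)]
      · rw [if_neg ht, if_neg (by
          intro hmem
          rcases List.mem_cons.1 hmem with h' | h'
          · exact h h'.symm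
          · exact ht h')]

-- the condition under which tile i makes A return True
abbrev matchCond (i : Int) (array : List Int) : Prop :=
  (i = 0 ∧ (16 : Int) ∈ array) ∨
  (i > 0 ∧ i ≤ 10 ∧ PySem.Int.mod i 2 = 0 ∧ (i - 1) ∈ array) ∨
  (i > 16 ∧ i ≤ 26 ∧ PySem.Int.mod i 2 = 0 ∧ (i - 1) ∈ array)

theorem matchTwoOuter_cons (i : Int) (rest array : List Int) :
    matchTwoOuter (i :: rest) array =
      if matchCond i array then some true else matchTwoOuter rest array := by
  have hstep : matchTwoOuter (i :: rest) array =
      (if i = 0 then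
        match matchTwoFind array 16 with
        | some b => some b
        | none => matchTwoOuter rest array
      else if i > 0 ∧ i ≤ 10 then
        if PySem.Int.mod i 2 = 0 then
          match matchTwoFind array (i - 1) with
          | some b => some b
          | none => matchTwoOuter rest array
        else matchTwoOuter rest array
      else if i > 16 ∧ i ≤ 26 then
        if PySem.Int.mod i 2 = 0 then
          match matchTwoFind array (i - 1) with
          | some b => some b
          | none => matchTwoOuter rest array
        else matchTwoOuter rest array
      else matchTwoOuter rest array) := rfl
  rw [hstep]
  by_cases hc : matchCond i array
  · rw [if_pos hc]
    rcases hc with ⟨h0, h16⟩ | ⟨h1, h2, h3, h4⟩ | ⟨h1, h2, h3, h4⟩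
    · rw [if_pos h0, matchTwoFind_eq, if_pos h16]
    · rw [if_neg (by omega : ¬ i = 0), if_pos ⟨h1, h2⟩, if_pos h3, matchTwoFind_eq, if_pos h4]
    · rw [if_neg (by omega : ¬ i = 0), if_neg (by omega : ¬ (i > 0 ∧ i ≤ 10)),
        if_pos ⟨h1, h2⟩, if_pos h3, matchTwoFind_eq, if_pos h4]
  · rw [if_neg hc]
    by_cases h0 : i = 0
    · have h16 : (16 : Int) ∉ array := fun h => hc (Or.inl ⟨h0, h⟩)
      rw [if_pos h0, matchTwoFind_eq, if_neg h16]
    · rw [if_neg h0]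
      by_cases hb : i > 0 ∧ i ≤ 10
      · rw [if_pos hb]
        by_cases he : PySem.Int.mod i 2 = 0
        · have hm : (i - 1) ∉ array := fun h => hc (Or.inr (Or.inl ⟨hb.1, hb.2, he, h⟩))
          rw [if_pos he, matchTwoFind_eq, if_neg hm]
        · rw [if_neg he]
      · rw [if_neg hb]
        by_cases hr : i > 16 ∧ i ≤ 26
        · rw [if_pos hr]
          by_cases he : PySem.Int.mod i 2 = 0
          · have hm : (i - 1) ∉ array := fun h => hc (Or.inr (Or.inr ⟨hr.1, hr.2, he, h⟩))
            rw [if_pos he, matchTwoFind_eq, if_neg hm]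
          · rw [if_neg he]
        · rw [if_neg hr]

theorem matchTwoOuter_eq (is_ array : List Int) :
    matchTwoOuter is_ array =
      if ∃ i ∈ is_, matchCond i array then some true else none := by
  induction is_ with
  | nil => simp [matchTwoOuter]
  | cons i rest ih =>
    rw [matchTwoOuter_cons, ih]
    by_cases h : matchCond i array
    · rw [if_pos h, if_pos ⟨i, List.mem_cons_self, h⟩]
    · rw [if_neg h]
      by_cases h2 : ∃ j ∈ rest, matchCond j array
      · obtain ⟨j, hj, hcj⟩ := h2
        rw [if_pos ⟨j, hj, hcj⟩, if_pos ⟨j, List.mem_cons_of_mem _ hj, hcj⟩]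
      · rw [if_neg h2, if_neg (by
          rintro ⟨j, hj, hcj⟩
          rcases List.mem_cons.1 hj with h' | h'
          · exact h (h' ▸ hcj)
          · exact h2 ⟨j, h', hcj⟩)]

theorem matchTwoPairs_eq (vs : List Int) (array : List Int) :
    matchTwoPairs vs (PySem.Set.ofList array) =
      if ∃ v ∈ vs, v ∈ array ∧ (v - 1) ∈ array then some true else none := by
  induction vs with
  | nil => simp [matchTwoPairs]
  | cons v rest ih =>
    rw [show matchTwoPairs (v :: rest) (PySem.Set.ofList array) =
        if PySem.Set.contains (PySem.Set.ofList array) v &&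
           PySem.Set.contains (PySem.Set.ofList array) (v - 1) then some true
        else matchTwoPairs rest (PySem.Set.ofList array) from rfl, ih]
    by_cases h : v ∈ array ∧ (v - 1) ∈ array
    · rw [if_pos (by simp only [Bool.and_eq_true, PySem.Set.contains_iff, PySem.Set.mem_ofList]; exact h),
        if_pos ⟨v, List.mem_cons_self, h⟩]
    · rw [if_neg (by
        simp only [Bool.and_eq_true, PySem.Set.contains_iff, PySem.Set.mem_ofList]
        exact h)]
      by_cases h2 : ∃ w ∈ rest, w ∈ array ∧ (w - 1) ∈ array
      · obtain ⟨w, hw, hwa⟩ := h2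
        rw [if_pos ⟨w, hw, hwa⟩, if_pos ⟨w, List.mem_cons_of_mem _ hw, hwa⟩]
      · rw [if_neg h2, if_neg (by
          rintro ⟨w, hw, hwa⟩
          rcases List.mem_cons.1 hw with hwv | hwr
          · exact h (hwv ▸ hwa)
          · exact h2 ⟨w, hwr, hwa⟩)]

theorem pyRange_2_11 : PySem.List.pyRange 2 11 2 = [2, 4, 6, 8, 10] := by decide
theorem pyRange_18_27 : PySem.List.pyRange 18 27 2 = [18, 20, 22, 24, 26] := by decide

theorem matchTwo_alt_eq (array : List Int) :
    matchTwo_alt array =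
      if ((0 : Int) ∈ array ∧ (16 : Int) ∈ array) ∨
         (∃ v ∈ ([2, 4, 6, 8, 10] : List Int), v ∈ array ∧ (v - 1) ∈ array) ∨
         (∃ v ∈ ([18, 20, 22, 24, 26] : List Int), v ∈ array ∧ (v - 1) ∈ array)
      then some true else none := by
  show (if PySem.Set.contains (PySem.Set.ofList array) 0 &&
           PySem.Set.contains (PySem.Set.ofList array) 16 then some true
        else
          match matchTwoPairs (PySem.List.pyRange 2 11 2) (PySem.Set.ofList array) with
          | some b => some b
          | none => matchTwoPairs (PySem.List.pyRange 18 27 2) (PySem.Set.ofList array)) = _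
  rw [pyRange_2_11, pyRange_18_27, matchTwoPairs_eq, matchTwoPairs_eq]
  by_cases hA : (0 : Int) ∈ array ∧ (16 : Int) ∈ array
  · rw [if_pos (by simp only [Bool.and_eq_true, PySem.Set.contains_iff, PySem.Set.mem_ofList]; exact hA),
      if_pos (Or.inl hA)]
  · rw [if_neg (by
      simp only [Bool.and_eq_true, PySem.Set.contains_iff, PySem.Set.mem_ofList]
      exact hA)]
    by_cases hB : ∃ v ∈ ([2, 4, 6, 8, 10] : List Int), v ∈ array ∧ (v - 1) ∈ array
    · rw [if_pos hB]
      rw [if_pos (Or.inr (Or.inl hB))]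
    · rw [if_neg hB]
      by_cases hC : ∃ v ∈ ([18, 20, 22, 24, 26] : List Int), v ∈ array ∧ (v - 1) ∈ array
      · rw [if_pos hC, if_pos (Or.inr (Or.inr hC))]
      · rw [if_neg hC, if_neg (by
          rintro (h | h | h)
          · exact hA h
          · exact hB h
          · exact hC h)]

theorem cond_iff (array : List Int) :
    (∃ i ∈ array, matchCond i array) ↔
      ((0 : Int) ∈ array ∧ (16 : Int) ∈ array) ∨
      (∃ v ∈ ([2, 4, 6, 8, 10] : List Int), v ∈ array ∧ (v - 1) ∈ array) ∨
      (∃ v ∈ ([18, 20, 22, 24, 26] : List Int), v ∈ array ∧ (v - 1) ∈ array) := by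
  constructor
  · rintro ⟨i, hi, ⟨h0, h16⟩ | ⟨h1, h2, h3, h4⟩ | ⟨h1, h2, h3, h4⟩⟩
    · exact Or.inl ⟨h0 ▸ hi, h16⟩
    · refine Or.inr (Or.inl ⟨i, ?_, hi, h4⟩)
      rw [PySem.Int.mod_eq_emod_of_pos (by norm_num)] at h3
      have : i = 2 ∨ i = 4 ∨ i = 6 ∨ i = 8 ∨ i = 10 := by omega
      rcases this with h | h | h | h | h <;> simp [h]
    · refine Or.inr (Or.inr ⟨i, ?_, hi, h4⟩)
      rw [PySem.Int.mod_eq_emod_of_pos (by norm_num)] at h3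
      have : i = 18 ∨ i = 20 ∨ i = 22 ∨ i = 24 ∨ i = 26 := by omega
      rcases this with h | h | h | h | h <;> simp [h]
  · rintro (⟨h0, h16⟩ | ⟨v, hv, hva, hvb⟩ | ⟨v, hv, hva, hvb⟩)
    · exact ⟨0, h0, Or.inl ⟨rfl, h16⟩⟩
    · refine ⟨v, hva, ?_⟩
      have hvs : v = 2 ∨ v = 4 ∨ v = 6 ∨ v = 8 ∨ v = 10 := by simpa using hv
      rcases hvs with h | h | h | h | h <;> subst h <;>
        exact Or.inr (Or.inl ⟨by decide, by decide, by decide, hvb⟩)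
    · refine ⟨v, hva, ?_⟩
      have hvs : v = 18 ∨ v = 20 ∨ v = 22 ∨ v = 24 ∨ v = 26 := by simpa using hv
      rcases hvs with h | h | h | h | h <;> subst h <;>
        exact Or.inr (Or.inr ⟨by decide, by decide, by decide, hvb⟩)

-- ===== VERDICT (by name: the statement is the Claim_ definition above) =====
theorem matchTwo_spec : Claim_equal_matchTwo := by
  intro array _
  show matchTwo array = matchTwo_alt array
  rw [matchTwo, matchTwoOuter_eq, matchTwo_alt_eq]
  by_cases h : ∃ i ∈ array, matchCond i array
  · rw [if_pos h, if_pos ((cond_iff array).1 h)]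
  · rw [if_neg h, if_neg (fun hc => h ((cond_iff array).2 hc))]
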